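-- pv_equiv track=rewrite | github.com/tonyatpeking/gameover | gameover/input/tony_hotkeys.py | move_cursor_down_until
-- ===== SOURCE A (Python) =====
-- def move_cursor_down_until(
--     lines: list[str], cursor_line_num: int, until_prefix: str = "#"
-- ):
--     num_lines = len(lines)
--     cursor_line = lines[cursor_line_num]
--     while True:
--         lines[cursor_line_num] = lines[cursor_line_num + 1]
--         lines[cursor_line_num + 1] = cursor_line
--         cursor_line_num += 1
--         if cursor_line_num == num_lines - 1:
--             break
--
--         if lines[cursor_line_num + 1].startswith(until_prefix):
--             break
--
--     return lines
-- ===== SOURCE B (Python) =====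
-- def move_cursor_down_until(
--     lines: list[str], cursor_line_num: int, until_prefix: str = "#"
-- ):
--     # Scan (without mutating) for the destination index, then splice once.
--     dest = cursor_line_num + 1
--     while dest != len(lines) - 1 and not lines[dest + 1].startswith(until_prefix):
--         dest += 1
--     lines.insert(dest, lines.pop(cursor_line_num))
--     return lines
-- ===== Notes on version B (the rewrite author's own statement) =====
-- stated objective: simpler
-- what changed: A bubbles the cursor line down with repeated adjacent swaps that mutate the list while it decides where to stop; B first scans (without mutating) for the destination index and then moves the line with a single pop/insert splice.
-- outside the precondition, e.g. on move_cursor_down_until(['a', 'b', 'c'], -1, '#'): A returns ['b', 'a', 'c'], B returns ['a', 'b', 'c']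
import Mathlib
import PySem

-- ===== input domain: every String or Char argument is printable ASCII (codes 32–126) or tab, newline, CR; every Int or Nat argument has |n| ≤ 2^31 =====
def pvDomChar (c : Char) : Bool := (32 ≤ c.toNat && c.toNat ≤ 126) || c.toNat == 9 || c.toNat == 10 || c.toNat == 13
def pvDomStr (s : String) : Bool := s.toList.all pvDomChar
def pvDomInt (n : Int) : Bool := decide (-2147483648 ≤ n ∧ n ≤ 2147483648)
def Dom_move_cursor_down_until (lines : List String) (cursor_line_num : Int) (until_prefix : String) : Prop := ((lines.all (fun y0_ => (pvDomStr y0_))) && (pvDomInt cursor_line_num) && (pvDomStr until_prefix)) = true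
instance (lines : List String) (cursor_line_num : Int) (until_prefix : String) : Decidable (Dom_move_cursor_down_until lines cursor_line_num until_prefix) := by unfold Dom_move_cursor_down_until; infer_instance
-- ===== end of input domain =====

-- B replaces A's mutate-as-you-go adjacent-swap bubble by a non-mutating scan for the
-- destination index followed by a single pop/insert splice (objective: simpler).
-- Both Pythons mutate `lines` in place to the same final contents on Pre_; the theorems
-- are about the returned value.

-- ===== PORT A =====
-- the while-True loop of A; fuel bounds the iteration count (the loop runs < len(lines)
-- times on Pre_); `none` from pyGet? (Python IndexError) is outside Pre_ and returns junk
def pvALoop (cursor_line : String) (num_lines : Int) (until_prefix : String)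
    (fuel : Nat) (lines : List String) (c : Int) : List String :=
  match fuel with
  | 0 => lines
  | fuel + 1 =>
    match PySem.List.pyGet? lines (c + 1) with
    | none => lines
    | some nxt =>
      let lines1 := PySem.List.pySetD lines c nxt
      let lines2 := PySem.List.pySetD lines1 (c + 1) cursor_line
      let c1 := c + 1
      if c1 = num_lines - 1 then lines2
      else
        match PySem.List.pyGet? lines2 (c1 + 1) with
        | none => lines2
        | some s =>
          if PySem.Str.startswith s until_prefix then lines2
          else pvALoop cursor_line num_lines until_prefix fuel lines2 c1

def move_cursor_down_until (lines : List String) (cursor_line_num : Int) (until_prefix : String) : List String :=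
  let num_lines : Int := lines.length
  match PySem.List.pyGet? lines cursor_line_num with
  | none => lines   -- IndexError: outside Pre_
  | some cursor_line => pvALoop cursor_line num_lines until_prefix (2 * lines.length + 1) lines cursor_line_num

-- ===== PORT B =====
-- B's scanning while-loop: advance dest until it is the last index or the next line
-- starts with the prefix; fuel as for A, `none` (IndexError) outside Pre_
def pvBScan (lines : List String) (until_prefix : String) (fuel : Nat) (dest : Int) : Int :=
  match fuel with
  | 0 => dest
  | fuel + 1 =>
    if dest = (lines.length : Int) - 1 then dest
    else
      match PySem.List.pyGet? lines (dest + 1) with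
      | none => dest
      | some s =>
        if PySem.Str.startswith s until_prefix then dest
        else pvBScan lines until_prefix fuel (dest + 1)

def move_cursor_down_until_alt (lines : List String) (cursor_line_num : Int) (until_prefix : String) : List String :=
  let dest := pvBScan lines until_prefix (2 * lines.length + 1) (cursor_line_num + 1)
  match PySem.List.pop? lines cursor_line_num with
  | none => lines   -- IndexError: outside Pre_
  | some (x, rest) => PySem.List.insert rest dest x

-- ===== PRECONDITION & SPEC =====
-- Pre_ excludes (a) cursor_line_num ≥ len(lines)-1 or < -len(lines), where A raises
-- IndexError, and (b) negative in-range cursor_line_num, where Python's wrap-around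
-- indexing makes A bubble the line off the end of the list and around to the front while
-- B splices with negative indices: both values are accidents of index arithmetic on a
-- corner no caller of a cursor-movement API would specify.
def Pre_move_cursor_down_until (lines : List String) (cursor_line_num : Int) (until_prefix : String) : Prop :=
  0 ≤ cursor_line_num ∧ cursor_line_num < (lines.length : Int) - 1
instance (lines : List String) (cursor_line_num : Int) (until_prefix : String) : Decidable (Pre_move_cursor_down_until lines cursor_line_num until_prefix) := by unfold Pre_move_cursor_down_until; infer_instance

def pvWitness_move_cursor_down_until : List String × Int × String := (["b", "a", "#x", "c"], 0, "#")

def Spec_move_cursor_down_until (lines : List String) (cursor_line_num : Int) (until_prefix : String) (out : List String) : Prop := out = move_cursor_down_until_alt lines cursor_line_num until_prefix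
instance (lines : List String) (cursor_line_num : Int) (until_prefix : String) (out : List String) : Decidable (Spec_move_cursor_down_until lines cursor_line_num until_prefix out) := by unfold Spec_move_cursor_down_until; infer_instance

-- ===== CLAIM (what is proved, stated in full; the proofs are below) =====
def Claim_equal_move_cursor_down_until : Prop := ∀ (lines : List String) (cursor_line_num : Int) (until_prefix : String), Dom_move_cursor_down_until lines cursor_line_num until_prefix → Pre_move_cursor_down_until lines cursor_line_num until_prefix → Spec_move_cursor_down_until lines cursor_line_num until_prefix (move_cursor_down_until lines cursor_line_num until_prefix)

-- ===== LEMMAS AND PROOFS =====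

-- proof-side recursion: what A's bubble does to the strict suffix after the cursor line
def pvBubble (x : String) (rest : List String) (p : String) : List String :=
  match rest with
  | [] => [x]
  | y :: rest' =>
    match rest' with
    | [] => [y, x]
    | z :: _ =>
      if PySem.Str.startswith z p then y :: x :: rest'
      else y :: pvBubble x rest' p

-- proof-side recursion: how far past the cursor line the moved line travels
def pvScanSuffix (rest : List String) (p : String) : Nat :=
  match rest with
  | [] => 0
  | _ :: rest' =>
    match rest' with
    | [] => 1
    | z :: _ =>
      if PySem.Str.startswith z p then 1
      else 1 + pvScanSuffix rest' p

theorem pvGetP {α : Type} (P : List α) (x : α) (t : List α) :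
    (P ++ x :: t)[P.length]? = some x := by
  simp

theorem pvGetP1 {α : Type} (P : List α) (x y : α) (t : List α) :
    (P ++ x :: y :: t)[P.length + 1]? = some y := by
  rw [List.getElem?_append_right (by omega)]
  simp

theorem pvSetP {α : Type} (P : List α) (x v : α) (t : List α) :
    (P ++ x :: t).set P.length v = P ++ v :: t := by
  induction P with
  | nil => simp
  | cons a P ih => simp [List.set_cons_succ, ih]

theorem pvEraseP {α : Type} (P : List α) (x : α) (t : List α) :
    (P ++ x :: t).eraseIdx P.length = P ++ t := by
  induction P with
  | nil => simp
  | cons a P ih => simp [ih]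

-- helper casts for pyGet?/pySetD at index ↑P.length + 1
theorem pvPyGetP {α : Type} (P : List α) (x : α) (t : List α) :
    PySem.List.pyGet? (P ++ x :: t) (P.length : Int) = some x := by
  rw [show ((P.length : Int)) = ((P.length : Nat) : Int) from rfl,
      PySem.List.pyGet?_natCast]
  exact pvGetP P x t

theorem pvPyGetP1 {α : Type} (P : List α) (x y : α) (t : List α) :
    PySem.List.pyGet? (P ++ x :: y :: t) ((P.length : Int) + 1) = some y := by
  rw [show ((P.length : Int) + 1) = ((P.length + 1 : Nat) : Int) by push_cast; ring,
      PySem.List.pyGet?_natCast]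
  exact pvGetP1 P x y t

theorem pvPySetP {α : Type} (P : List α) (x v : α) (t : List α) :
    PySem.List.pySetD (P ++ x :: t) (P.length : Int) v = P ++ v :: t := by
  rw [show ((P.length : Int)) = ((P.length : Nat) : Int) from rfl,
      PySem.List.pySetD_natCast]
  exact pvSetP P x v t

theorem pvPySetP1 {α : Type} (P : List α) (a x v : α) (t : List α) :
    PySem.List.pySetD (P ++ a :: x :: t) ((P.length : Int) + 1) v = P ++ a :: v :: t := by
  have h : (P ++ a :: x :: t) = (P ++ [a]) ++ x :: t := by simp
  rw [h, show ((P.length : Int) + 1) = (((P ++ [a]).length : Nat) : Int) by simp,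
      PySem.List.pySetD_natCast, pvSetP]
  simp

-- A's loop, started at cursor position P.length on the list P ++ x :: rest, performs pvBubble
theorem pvALoop_eq (p : String) (rest : List String) :
    ∀ (P : List String) (x : String) (fuel : Nat), rest ≠ [] → rest.length ≤ fuel →
    pvALoop x ((P.length + 1 + rest.length : Nat) : Int) p fuel (P ++ x :: rest) (P.length : Int)
      = P ++ pvBubble x rest p := by
  induction rest with
  | nil => intro _ _ _ h; exact absurd rfl h
  | cons y rest' ih =>
    intro P x fuel _ hfuel
    match fuel, hfuel with
    | fuel + 1, hfuel =>
      rw [pvALoop]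
      rw [pvPyGetP1 P x y rest']
      simp only []
      rw [pvPySetP P x y (y :: rest'), pvPySetP1 P y y x rest']
      split_ifs with hcond
      · have hnil : rest' = [] := by
          push_cast at hcond
          simp only [List.length_cons] at hcond
          have : rest'.length = 0 := by omega
          exact List.eq_nil_of_length_eq_zero this
        subst hnil
        simp [pvBubble]
      · have hne : rest' ≠ [] := by
          intro h; subst h
          apply hcond
          push_cast
          simp
        rcases rest' with _ | ⟨z, t⟩
        · exact absurd rfl hne
        · rw [show (P ++ y :: x :: z :: t) = ((P ++ [y]) ++ x :: z :: t) by simp]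
          rw [show ((P.length : Int) + 1 + 1) = (((P ++ [y]).length : Int) + 1) by simp]
          rw [pvPyGetP1 (P ++ [y]) x z t]
          simp only []
          by_cases hz : PySem.Str.startswith z p = true
          · rw [if_pos hz]
            have hb : pvBubble x (y :: z :: t) p = y :: x :: z :: t := by
              simp only [pvBubble]
              rw [if_pos hz]
            rw [hb]
            simp
          · rw [if_neg hz]
            have hfe : (z :: t).length ≤ fuel := by
              simp only [List.length_cons] at hfuel ⊢; omega
            have hnum : (P.length + 1 + (y :: z :: t).length : Nat)
                = ((P ++ [y]).length + 1 + (z :: t).length : Nat) := by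
              simp; omega
            have hc1 : ((P.length : Int) + 1) = (((P ++ [y]).length : Nat) : Int) := by
              simp
            rw [hnum, hc1, ih (P ++ [y]) x fuel (by simp) hfe]
            have hb : pvBubble x (y :: z :: t) p = y :: pvBubble x (z :: t) p := by
              simp only [pvBubble]
              rw [if_neg hz]
            rw [hb]
            simp

-- B's scan, started at dest = P.length + 1 on P ++ x :: rest, finds P.length + pvScanSuffix
theorem pvBScan_eq (p : String) (rest : List String) :
    ∀ (P : List String) (x : String) (fuel : Nat), rest ≠ [] → rest.length ≤ fuel →
    pvBScan (P ++ x :: rest) p fuel ((P.length : Int) + 1)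
      = (P.length : Int) + (pvScanSuffix rest p : Int) := by
  induction rest with
  | nil => intro _ _ _ h; exact absurd rfl h
  | cons y rest' ih =>
    intro P x fuel _ hfuel
    match fuel, hfuel with
    | fuel + 1, hfuel =>
      rw [pvBScan]
      split_ifs with hcond
      · have hnil : rest' = [] := by
          push_cast at hcond
          simp only [List.length_append, List.length_cons] at hcond
          have : rest'.length = 0 := by omega
          exact List.eq_nil_of_length_eq_zero this
        subst hnil
        simp [pvScanSuffix]
      · have hne : rest' ≠ [] := by
          intro h; subst h
          apply hcond
          simp
          ring
        rcases rest' with _ | ⟨z, t⟩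
        · exact absurd rfl hne
        · rw [show (P ++ x :: y :: z :: t) = ((P ++ [x]) ++ y :: z :: t) by simp]
          rw [show ((P.length : Int) + 1 + 1) = (((P ++ [x]).length : Int) + 1) by simp]
          rw [pvPyGetP1 (P ++ [x]) y z t]
          simp only []
          by_cases hz : PySem.Str.startswith z p = true
          · rw [if_pos hz]
            have hs : pvScanSuffix (y :: z :: t) p = 1 := by
              simp only [pvScanSuffix]
              rw [if_pos hz]
            rw [hs]
            norm_num
          · rw [if_neg hz]
            have hfe : (z :: t).length ≤ fuel := by
              simp only [List.length_cons] at hfuel ⊢; omega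
            rw [ih (P ++ [x]) y fuel (by simp) hfe]
            have hs : pvScanSuffix (y :: z :: t) p = 1 + pvScanSuffix (z :: t) p := by
              simp only [pvScanSuffix]
              rw [if_neg hz]
            rw [hs]
            push_cast
            simp
            ring

-- the moved line travels at least 1 and at most rest.length positions
theorem pvScanSuffix_bounds (rest : List String) (p : String) (h : rest ≠ []) :
    1 ≤ pvScanSuffix rest p ∧ pvScanSuffix rest p ≤ rest.length := by
  induction rest with
  | nil => exact absurd rfl h
  | cons y rest' ih =>
    rcases rest' with _ | ⟨z, t⟩
    · simp [pvScanSuffix]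
    · by_cases hz : PySem.Str.startswith z p = true
      · have hs : pvScanSuffix (y :: z :: t) p = 1 := by
          simp only [pvScanSuffix]; rw [if_pos hz]
        simp [hs]
      · have hs : pvScanSuffix (y :: z :: t) p = 1 + pvScanSuffix (z :: t) p := by
          simp only [pvScanSuffix]; rw [if_neg hz]
        obtain ⟨ha, hb⟩ := ih (by simp)
        simp only [List.length_cons] at ha hb ⊢
        simp only [hs]
        omega

-- the bubble result IS the splice at the scanned destination
theorem pvBubble_eq_splice (rest : List String) (p : String) (x : String) (h : rest ≠ []) :
    pvBubble x rest p
      = rest.take (pvScanSuffix rest p) ++ x :: rest.drop (pvScanSuffix rest p) := by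
  induction rest with
  | nil => exact absurd rfl h
  | cons y rest' ih =>
    rcases rest' with _ | ⟨z, t⟩
    · rfl
    · by_cases hz : PySem.Str.startswith z p = true
      · have hs : pvScanSuffix (y :: z :: t) p = 1 := by
          simp only [pvScanSuffix]; rw [if_pos hz]
        have hb : pvBubble x (y :: z :: t) p = y :: x :: z :: t := by
          simp only [pvBubble]; rw [if_pos hz]
        simp [hs, hb]
      · have hs : pvScanSuffix (y :: z :: t) p = 1 + pvScanSuffix (z :: t) p := by
          simp only [pvScanSuffix]; rw [if_neg hz]
        have hb : pvBubble x (y :: z :: t) p = y :: pvBubble x (z :: t) p := by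
          simp only [pvBubble]; rw [if_neg hz]
        rw [hs, hb, ih (by simp), Nat.add_comm 1 (pvScanSuffix (z :: t) p)]
        simp

-- popping the cursor element from the decomposed list
theorem pvPopP (P : List String) (x : String) (t : List String) :
    PySem.List.pop? (P ++ x :: t) ((P.length : Nat) : Int) = some (x, P ++ t) := by
  rw [PySem.List.pop?_natCast (P ++ x :: t) P.length (by simp)]
  rw [pvEraseP]
  congr 1
  rw [Prod.mk.injEq]
  refine ⟨?_, rfl⟩
  have h := pvGetP P x t
  rw [List.getElem?_eq_getElem (by simp)] at h
  exact Option.some.inj h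

-- the two ports agree on any list decomposed at the cursor position
theorem pvPorts_eq (P : List String) (x : String) (rest : List String) (p : String)
    (h : rest ≠ []) :
    move_cursor_down_until (P ++ x :: rest) (P.length : Int) p
      = move_cursor_down_until_alt (P ++ x :: rest) (P.length : Int) p := by
  have hlen : rest.length ≤ 2 * (P ++ x :: rest).length + 1 := by simp; omega
  -- A side
  rw [move_cursor_down_until]
  rw [show ((P.length : Int)) = ((P.length : Nat) : Int) from rfl, pvPyGetP P x rest]
  simp only []
  rw [show (((P ++ x :: rest).length : Nat) : Int) = ((P.length + 1 + rest.length : Nat) : Int) by push_cast; simp; omega]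
  rw [pvALoop_eq p rest P x (2 * (P ++ x :: rest).length + 1) h hlen]
  -- B side
  rw [move_cursor_down_until_alt]
  rw [pvBScan_eq p rest P x (2 * (P ++ x :: rest).length + 1) h hlen]
  rw [pvPopP P x rest]
  simp only []
  obtain ⟨h1, h2⟩ := pvScanSuffix_bounds rest p h
  rw [show ((P.length : Int)) + ((pvScanSuffix rest p : Nat) : Int) = ((P.length + pvScanSuffix rest p : Nat) : Int) by push_cast; ring]
  rw [PySem.List.insert_natCast _ _ _ (by simp only [List.length_append]; omega)]
  rw [pvBubble_eq_splice rest p x h]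
  rw [List.take_append, List.drop_append]
  have ht : List.take (P.length + pvScanSuffix rest p) P = P := List.take_of_length_le (by omega)
  have hd : List.drop (P.length + pvScanSuffix rest p) P = [] := List.drop_eq_nil_of_le (by omega)
  rw [ht, hd]
  simp

-- ===== VERDICT (by name: the statement is the Claim_ definition above) =====
theorem move_cursor_down_until_spec : Claim_equal_move_cursor_down_until := by
  intro lines c p _ hpre
  obtain ⟨h0, h1⟩ := hpre
  unfold Spec_move_cursor_down_until
  have hk : c.toNat < lines.length := by omega
  have hck : c = (c.toNat : Int) := by omega
  have hdec : lines = lines.take c.toNat ++ lines[c.toNat] :: lines.drop (c.toNat + 1) := by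
    rw [List.getElem_cons_drop, List.take_append_drop]
  have hlenP : (lines.take c.toNat).length = c.toNat := by
    simp [List.length_take]; omega
  have hrest : lines.drop (c.toNat + 1) ≠ [] := by
    intro he
    have hl := congrArg List.length he
    simp only [List.length_drop, List.length_nil] at hl
    omega
  calc move_cursor_down_until lines c p
      = move_cursor_down_until (lines.take c.toNat ++ lines[c.toNat] :: lines.drop (c.toNat + 1)) (((lines.take c.toNat).length : Nat) : Int) p := by
        rw [← hdec, hlenP, ← hck]
    _ = move_cursor_down_until_alt (lines.take c.toNat ++ lines[c.toNat] :: lines.drop (c.toNat + 1)) (((lines.take c.toNat).length : Nat) : Int) p :=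
        pvPorts_eq _ _ _ p hrest
    _ = move_cursor_down_until_alt lines c p := by
        rw [← hdec, hlenP, ← hck]
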